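-- pv_equiv track=rewrite | github.com/pavanidurgach/17B01A0423 | divisibility_of_factorials.py | divisibility
-- ===== SOURCE A (Python) =====
-- def divisibility(number):
--     total = 0
--     for x in range(2,number+1):
--         for i in range(2,x+1):
--             if factorial(i) % x == 0:
--                total = total + i
--                break
--     return total
--
-- def factorial(number):
--     factorial = 1
--     while number > 0:
--           factorial = factorial * number
--           number = number - 1
--     return factorial
-- ===== SOURCE B (Python) =====
-- def divisibility(number):
--     total = 0
--     for x in range(2, number + 1):
--         total += kempner(x)
--     return total
--
-- def kempner(x):
--     rem, i = 1, 1
--     while rem: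
--         i += 1
--         rem = rem * i % x
--     return i
-- ===== Notes on version B (the rewrite author's own statement) =====
-- stated objective: faster
-- what changed: B replaces A's recomputation of factorial(i) as a full bignum product for every candidate i with a per-x incremental running remainder (rem = rem * i % x), so each candidate costs one small-int multiply-mod instead of an O(i) bignum factorial.
import Mathlib
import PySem

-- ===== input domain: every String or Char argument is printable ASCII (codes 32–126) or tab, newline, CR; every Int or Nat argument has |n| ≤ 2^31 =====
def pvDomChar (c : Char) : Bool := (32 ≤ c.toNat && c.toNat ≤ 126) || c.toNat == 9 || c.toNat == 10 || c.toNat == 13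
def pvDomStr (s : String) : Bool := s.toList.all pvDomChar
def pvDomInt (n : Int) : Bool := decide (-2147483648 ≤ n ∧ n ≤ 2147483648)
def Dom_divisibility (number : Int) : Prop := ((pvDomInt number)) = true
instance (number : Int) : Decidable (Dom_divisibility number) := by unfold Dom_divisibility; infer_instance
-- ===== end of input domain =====

-- B replaces A's per-candidate bignum factorial recomputation by a per-x incremental
-- running remainder rem = rem * i % x (one small multiply-mod per candidate): faster.

-- ===== PORT A =====
-- A's 'factorial' while-loop; fuel = number.toNat is exactly the number of iterations
def factLoopA : Int → Int → Nat → Int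
  | acc, _, 0 => acc
  | acc, number, fuel + 1 =>
      if number > 0 then factLoopA (acc * number) (number - 1) fuel else acc

def factorialA (number : Int) : Int := factLoopA 1 number number.toNat

-- A's inner 'for i in range(2, x+1)' with break: returns the updated total
def innerA (total x : Int) : List Int → Int
  | [] => total
  | i :: rest =>
      if PySem.Int.mod (factorialA i) x = 0 then total + i
      else innerA total x rest

def divisibility (number : Int) : Int :=
  (PySem.List.pyRange 2 (number + 1) 1).foldl
    (fun total x => innerA total x (PySem.List.pyRange 2 (x + 1) 1)) 0

-- ===== PORT B =====
-- B's 'while rem:' loop; fuel = x.toNat bounds the iterations (rem hits 0 at i = x)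
def kemLoop (x : Int) : Int → Int → Nat → Int
  | _, i, 0 => i
  | rem, i, fuel + 1 =>
      if rem ≠ 0 then kemLoop x (PySem.Int.mod (rem * (i + 1)) x) (i + 1) fuel
      else i

def kempner (x : Int) : Int := kemLoop x 1 1 x.toNat

def divisibility_alt (number : Int) : Int :=
  (PySem.List.pyRange 2 (number + 1) 1).foldl
    (fun total x => total + kempner x) 0

-- ===== PRECONDITION & SPEC =====
def Spec_divisibility (number : Int) (out : Int) : Prop := out = divisibility_alt number
instance (number : Int) (out : Int) : Decidable (Spec_divisibility number out) := by
  unfold Spec_divisibility; infer_instance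

-- ===== CLAIM (what is proved, stated in full; the proofs are below) =====
def Claim_equal_divisibility : Prop :=
  ∀ (number : Int), Dom_divisibility number → Spec_divisibility number (divisibility number)

-- ===== LEMMAS AND PROOFS =====

theorem factLoopA_mul : ∀ (fuel : Nat) (acc n : Int),
    factLoopA acc n fuel = acc * factLoopA 1 n fuel := by
  intro fuel
  induction fuel with
  | zero => intro acc n; simp [factLoopA]
  | succ k ih =>
      intro acc n
      simp only [factLoopA]
      split_ifs with h
      · rw [ih (acc * n), ih (1 * n)]; ring
      · ring

theorem factorialA_succ (i : Int) (hi : 0 ≤ i) :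
    factorialA (i + 1) = (i + 1) * factorialA i := by
  unfold factorialA
  have h1 : (i + 1).toNat = i.toNat + 1 := by omega
  rw [h1]
  simp only [factLoopA]
  rw [if_pos (by omega), factLoopA_mul]
  have : i + 1 - 1 = i := by ring
  rw [this]; ring

theorem dvd_factorialA (x : Int) (hx : 1 ≤ x) : x ∣ factorialA x := by
  unfold factorialA
  have h1 : x.toNat = (x - 1).toNat + 1 := by omega
  rw [h1]
  simp only [factLoopA]
  rw [if_pos (by omega), factLoopA_mul]
  exact ⟨factLoopA 1 (x - 1) ((x - 1).toNat), by ring⟩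

theorem inner_eq : ∀ (fuel : Nat) (x i total : Int), 2 ≤ x → 2 ≤ i → i ≤ x →
    (x - i).toNat ≤ fuel →
    total + kemLoop x (PySem.Int.mod (factorialA i) x) i fuel
      = innerA total x (PySem.List.pyRange i (x + 1) 1) := by
  intro fuel
  induction fuel with
  | zero =>
      intro x i total hx hi hix hfuel
      have hieq : i = x := by omega
      subst hieq
      rw [PySem.List.pyRange_one_cons (by omega),
          PySem.List.pyRange_one_eq_nil (by omega)]
      simp only [kemLoop, innerA]
      rw [if_pos ((PySem.Int.mod_eq_zero_iff_dvd _ _).mpr (dvd_factorialA i (by omega)))]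
  | succ k ih =>
      intro x i total hx hi hix hfuel
      rw [PySem.List.pyRange_one_cons (by omega)]
      simp only [kemLoop, innerA]
      by_cases h0 : PySem.Int.mod (factorialA i) x = 0
      · rw [if_pos h0, if_neg (by simp [h0])]
      · rw [if_neg h0, if_pos h0]
        have hxpos : (0 : Int) < x := by omega
        have hlt : i < x := by
          rcases lt_or_eq_of_le hix with h | h
          · exact h
          · exact absurd ((PySem.Int.mod_eq_zero_iff_dvd _ _).mpr
              (h ▸ dvd_factorialA x (by omega))) h0
        have hmodeq : PySem.Int.mod (PySem.Int.mod (factorialA i) x * (i + 1)) x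
            = PySem.Int.mod (factorialA (i + 1)) x := by
          simp only [PySem.Int.mod_eq_emod_of_pos, hxpos]
          rw [factorialA_succ i (by omega),
              Int.mul_emod, Int.emod_emod_of_dvd _ dvd_rfl, ← Int.mul_emod, mul_comm]
        rw [hmodeq]
        exact ih x (i + 1) total hx (by omega) (by omega) (by omega)

theorem kempner_eq_inner (x total : Int) (hx : 2 ≤ x) :
    total + kempner x = innerA total x (PySem.List.pyRange 2 (x + 1) 1) := by
  unfold kempner
  obtain ⟨k, hk⟩ : ∃ k, x.toNat = k + 1 := ⟨x.toNat - 1, by omega⟩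
  rw [hk]
  simp only [kemLoop]
  rw [if_pos (by norm_num)]
  have hf2 : factorialA 2 = 2 := by decide
  have h2 : PySem.Int.mod ((1 : Int) * (1 + 1)) x = PySem.Int.mod (factorialA 2) x := by
    rw [hf2]; norm_num
  rw [h2, hf2, show ((1 : Int) + 1) = 2 by norm_num]
  rw [← hf2]
  exact inner_eq k x 2 total hx (by omega) (by omega) (by omega)

-- ===== VERDICT (by name: the statement is the Claim_ definition above) =====
theorem divisibility_spec : Claim_equal_divisibility := by
  intro number _
  unfold Spec_divisibility divisibility divisibility_alt
  refine PySem.List.foldl_congr_mem _ _ _ _ ?_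
  intro acc x hx
  have h2 : 2 ≤ x := ((PySem.List.mem_pyRange_one).mp hx).1
  exact (kempner_eq_inner x acc h2).symm
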